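-- pv_equiv track=rewrite | github.com/varunisrani/thinkaiback | scheduling/agents/assistant_director_agent.py | _generate_shooting_order
-- ===== SOURCE A (Python) =====
-- from typing import Dict, Any, List
--
-- def _generate_shooting_order(location_groups: Dict[str, List[str]], scenes: Dict[str, Any]) -> List[str]:
--     """Generate optimized shooting order based on location and complexity."""
--     shooting_order = []
--
--     # Sort locations by number of scenes (shoot locations with more scenes first)
--     sorted_locations = sorted(location_groups.items(), key=lambda x: len(x[1]), reverse=True)
--
--     for location, scene_numbers in sorted_locations:
--         # Sort scenes within location by complexity (simpler first)
--         location_scenes = [(num, scenes[num]) for num in scene_numbers]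
--         location_scenes.sort(key=lambda x: len(x[1].get('special_equipment', [])))
--
--         shooting_order.extend([scene[0] for scene in location_scenes])
--
--     return shooting_order
-- ===== SOURCE B (Python) =====
-- from typing import Dict, Any, List
--
-- def _generate_shooting_order(location_groups: Dict[str, List[str]], scenes: Dict[str, Any]) -> List[str]:
--     """Same order via one flat entry list and two global stable sorts instead of nested per-location sorts."""
--     entries = []
--     for idx, scene_numbers in enumerate(location_groups.values()):
--         count = len(scene_numbers)
--         for num in scene_numbers:
--             complexity = len(scenes[num].get('special_equipment', []))
--             entries.append((num, count, idx, complexity))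
--     entries.sort(key=lambda e: e[3])                  # within-location: simpler first (stable)
--     entries.sort(key=lambda e: (-e[1], e[2]))         # group by location, most scenes first
--     return [e[0] for e in entries]
-- ===== Notes on version B (the rewrite author's own statement) =====
-- stated objective: alternative
-- what changed: Replaces A's nested per-location sorts (outer reverse sort of locations by scene count, inner sort of each location's scenes by complexity) with one flat list of (scene, count, location-index, complexity) entries and two global stable sort passes (by complexity, then by (-count, location-index)), relying on sort stability for the grouping.
import Mathlib
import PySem

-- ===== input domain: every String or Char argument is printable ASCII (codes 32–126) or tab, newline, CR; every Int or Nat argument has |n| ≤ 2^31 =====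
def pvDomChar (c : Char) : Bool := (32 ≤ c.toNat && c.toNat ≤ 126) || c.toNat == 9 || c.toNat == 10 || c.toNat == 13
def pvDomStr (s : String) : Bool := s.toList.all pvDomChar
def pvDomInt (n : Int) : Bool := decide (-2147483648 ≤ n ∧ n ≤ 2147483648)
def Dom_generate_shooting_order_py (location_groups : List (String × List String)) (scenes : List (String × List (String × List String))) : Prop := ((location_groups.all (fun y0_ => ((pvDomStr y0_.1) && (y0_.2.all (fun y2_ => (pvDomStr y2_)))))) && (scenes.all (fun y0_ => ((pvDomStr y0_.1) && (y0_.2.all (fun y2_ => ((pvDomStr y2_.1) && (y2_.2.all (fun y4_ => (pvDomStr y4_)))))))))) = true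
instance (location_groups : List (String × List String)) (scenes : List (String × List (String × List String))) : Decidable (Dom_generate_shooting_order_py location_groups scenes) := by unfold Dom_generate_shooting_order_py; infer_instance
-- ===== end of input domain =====

-- B replaces A's nested per-location sorts by one flat entry list and two global stable sorts
-- (by complexity, then by (-scene count, location position)); objective: alternative decomposition, same cost class.

-- ===== PORT A =====
def generate_shooting_order_py (location_groups : List (String × List String)) (scenes : List (String × List (String × List String))) : List String :=
  let sorted_locations := PySem.List.sorted location_groups (fun x => (x.2.length : Int)) true
  sorted_locations.foldl (fun shooting_order x =>
    let location_scenes := x.2.map (fun num => (num, PySem.Dict.getD (PySem.Dict.mk scenes) num []))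
    let location_scenes2 := PySem.List.sorted location_scenes
      (fun y => ((PySem.Dict.getD (PySem.Dict.mk y.2) "special_equipment" []).length : Int)) false
    shooting_order ++ location_scenes2.map (fun s => s.1)) []

-- ===== PORT B =====
def generate_shooting_order_py_alt (location_groups : List (String × List String)) (scenes : List (String × List (String × List String))) : List String :=
  let entries := (PySem.List.enumerate location_groups).flatMap (fun p =>
    p.2.2.map (fun num =>
      (num, ((p.2.2.length : Int), p.1,
        ((PySem.Dict.getD (PySem.Dict.mk (PySem.Dict.getD (PySem.Dict.mk scenes) num [])) "special_equipment" []).length : Int)))))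
  let e1 := PySem.List.sorted entries (fun e => e.2.2.2) false
  let e2 := PySem.List.sorted2 e1 (fun e => -e.2.1) (fun e => e.2.2.1) false
  e2.map (fun e => e.1)

-- ===== PRECONDITION & SPEC =====
-- Pre_ excludes exactly the inputs where Python A raises KeyError: a scene number listed in
-- location_groups that is not a key of scenes.
def Pre_generate_shooting_order_py (location_groups : List (String × List String)) (scenes : List (String × List (String × List String))) : Prop :=
  ∀ g ∈ location_groups, ∀ num ∈ g.2, (PySem.Dict.get? (PySem.Dict.mk scenes) num).isSome = true
instance (location_groups : List (String × List String)) (scenes : List (String × List (String × List String))) : Decidable (Pre_generate_shooting_order_py location_groups scenes) := by unfold Pre_generate_shooting_order_py; infer_instance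
def pvWitness_generate_shooting_order_py : (List (String × List String)) × (List (String × List (String × List String))) :=
  ([("Lot", ["1", "2"]), ("Bar", ["3"])],
   [("1", [("special_equipment", ["crane"])]), ("2", []), ("3", [("special_equipment", [])])])
def Spec_generate_shooting_order_py (location_groups : List (String × List String)) (scenes : List (String × List (String × List String))) (out : List String) : Prop := out = generate_shooting_order_py_alt location_groups scenes
instance (location_groups : List (String × List String)) (scenes : List (String × List (String × List String))) (out : List String) : Decidable (Spec_generate_shooting_order_py location_groups scenes out) := by unfold Spec_generate_shooting_order_py; infer_instance

-- ===== CLAIM (what is proved, stated in full; the proofs are below) =====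
def Claim_equal_generate_shooting_order_py : Prop := ∀ (location_groups : List (String × List String)) (scenes : List (String × List (String × List String))), Dom_generate_shooting_order_py location_groups scenes → Pre_generate_shooting_order_py location_groups scenes → Spec_generate_shooting_order_py location_groups scenes (generate_shooting_order_py location_groups scenes)

-- ===== LEMMAS AND PROOFS =====

-- passing a prefix the inserted element does not go before
theorem insertBy_append_left {α : Type} (b : α → α → Bool) (x : α) (l1 l2 : List α)
    (h : ∀ y ∈ l1, b x y = false) :
    PySem.List.insertBy b x (l1 ++ l2) = l1 ++ PySem.List.insertBy b x l2 := by
  induction l1 with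
  | nil => simp
  | cons y t ih =>
      simp only [List.cons_append, PySem.List.insertBy, h y (by simp)]
      simp [ih (fun z hz => h z (by simp [hz]))]

-- the inserted element goes before everything
theorem insertBy_all_before {α : Type} (b : α → α → Bool) (x : α) (l : List α)
    (h : ∀ y ∈ l, b x y = true) :
    PySem.List.insertBy b x l = x :: l := by
  cases l with
  | nil => rfl
  | cons y t => simp [PySem.List.insertBy, h y (by simp)]

-- filter commutes with inserting into an already key-sorted list
theorem filter_insertBy {α κ : Type} [LinearOrder κ] (key : α → κ) (p : α → Bool) (x : α) (l : List α)
    (hpw : l.Pairwise (fun a b => key a ≤ key b)) :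
    (PySem.List.insertBy (fun a b => decide (key a < key b)) x l).filter p
      = if p x then PySem.List.insertBy (fun a b => decide (key a < key b)) x (l.filter p) else l.filter p := by
  induction l with
  | nil =>
      by_cases hx : p x = true <;> simp [PySem.List.insertBy, hx]
  | cons y t ih =>
      by_cases hb : key x < key y
      · have hstep : PySem.List.insertBy (fun a b => decide (key a < key b)) x (y :: t) = x :: y :: t := by
          simp [PySem.List.insertBy, hb]
        rw [hstep]
        by_cases hx : p x = true
        · rw [insertBy_all_before _ _ _ (fun z hz => by
            have hz' := List.mem_of_mem_filter hz
            rw [List.mem_cons] at hz'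
            simp only [decide_eq_true_eq]
            rcases hz' with h | h
            · exact h ▸ hb
            · exact lt_of_lt_of_le hb ((List.pairwise_cons.mp hpw).1 z h))]
          simp [List.filter_cons, hx]
        · simp [List.filter_cons, hx]
      · have hstep : PySem.List.insertBy (fun a b => decide (key a < key b)) x (y :: t)
            = y :: PySem.List.insertBy (fun a b => decide (key a < key b)) x t := by
          simp [PySem.List.insertBy, hb]
        rw [hstep]
        have iht := ih (List.pairwise_cons.mp hpw).2
        by_cases hy : p y = true
        · have hstep2 : PySem.List.insertBy (fun a b => decide (key a < key b)) x (y :: t.filter p)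
              = y :: PySem.List.insertBy (fun a b => decide (key a < key b)) x (t.filter p) := by
            simp [PySem.List.insertBy, hb]
          by_cases hx : p x = true <;>
            simp [hy, hx, iht, hstep2]
        · by_cases hx : p x = true <;> simp [hy, hx, iht]

-- filter commutes with Python's stable sort
theorem filter_sorted {α κ : Type} [LinearOrder κ] (xs : List α) (key : α → κ) (p : α → Bool) :
    (PySem.List.sorted xs key false).filter p = PySem.List.sorted (xs.filter p) key false := by
  rw [PySem.List.sorted_eq_foldl_insertBy, PySem.List.sorted_eq_foldl_insertBy]
  suffices h : ∀ (l : List α) (acc : List α), acc.Pairwise (fun a b => key a ≤ key b) →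
      (l.foldl (fun acc x => PySem.List.insertBy (fun a b => decide (key a < key b)) x acc) acc).filter p
        = (l.filter p).foldl (fun acc x => PySem.List.insertBy (fun a b => decide (key a < key b)) x acc) (acc.filter p) by
    simpa using h xs [] (by simp)
  intro l
  induction l with
  | nil => simp
  | cons x t ih =>
      intro acc hacc
      simp only [List.foldl_cons, List.filter_cons]
      rw [ih _ (PySem.List.insertBy_pairwise_le key x acc hacc), filter_insertBy key p x acc hacc]
      by_cases hx : p x = true <;> simp [hx]

-- stable sort of a mapped list
theorem map_insertBy {α β : Type} (f : α → β) (b : α → α → Bool) (b' : β → β → Bool)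
    (hb : ∀ a c, b' (f a) (f c) = b a c) (x : α) (l : List α) :
    PySem.List.insertBy b' (f x) (l.map f) = (PySem.List.insertBy b x l).map f := by
  induction l with
  | nil => rfl
  | cons y t ih =>
      simp only [List.map_cons, PySem.List.insertBy, hb]
      by_cases h : b x y = true <;> simp [h, ih]

theorem map_sorted {α β κ : Type} [LT κ] [DecidableLT κ] (f : α → β) (key : β → κ) (xs : List α) :
    PySem.List.sorted (xs.map f) key false = (PySem.List.sorted xs (fun a => key (f a)) false).map f := by
  rw [PySem.List.sorted_eq_foldl_insertBy, PySem.List.sorted_eq_foldl_insertBy]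
  suffices h : ∀ (l : List α) (acc : List α),
      (l.map f).foldl (fun acc x => PySem.List.insertBy (fun a b => decide (key a < key b)) x acc) (acc.map f)
        = (l.foldl (fun acc x => PySem.List.insertBy (fun a b => decide (key (f a) < key (f b))) x acc) acc).map f by
    simpa using h xs []
  intro l
  induction l with
  | nil => simp
  | cons x t ih =>
      intro acc
      simp only [List.map_cons, List.foldl_cons]
      rw [map_insertBy f (fun a b => decide (key (f a) < key (f b))) (fun a b => decide (key a < key b)) (fun a c => rfl)]
      exact ih _

-- every index in `enumerate xs s` is ≥ s
theorem enumerate_fst_ge {α : Type} (xs : List α) (s : Int) :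
    ∀ q ∈ PySem.List.enumerate xs s, s ≤ q.1 := by
  induction xs generalizing s with
  | nil => simp [PySem.List.enumerate]
  | cons x t ih =>
      intro q hq
      rw [PySem.List.enumerate_cons, List.mem_cons] at hq
      rcases hq with h | h
      · simp [h]
      · have := ih (s + 1) q h; omega

theorem enumerate_pairwise_fst_lt {α : Type} (xs : List α) (s : Int) :
    (PySem.List.enumerate xs s).Pairwise (fun p q => p.1 < q.1) := by
  induction xs generalizing s with
  | nil => simp [PySem.List.enumerate]
  | cons x t ih =>
      rw [PySem.List.enumerate_cons]
      exact List.Pairwise.cons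
        (fun q hq => by have := enumerate_fst_ge t (s+1) q hq; show s < q.1; omega) (ih (s+1))

theorem enumerate_fst_inj {α : Type} (xs : List α) (s : Int) {p q : Int × α}
    (hp : p ∈ PySem.List.enumerate xs s) (hq : q ∈ PySem.List.enumerate xs s) (h : p.1 = q.1) : p = q := by
  by_contra hne
  have hpw : (PySem.List.enumerate xs s).Pairwise (fun p q => p.1 ≠ q.1) :=
    (enumerate_pairwise_fst_lt xs s).imp (fun h => by omega)
  exact (hpw.forall (fun a b h h' => (h h'.symm).elim) hp hq hne) h

-- the list of projections under the decorated reverse-stable sort equals Python's reverse sort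
theorem snd_sorted2_enumerate {α : Type} (xs : List α) (key : α → Int) :
    (PySem.List.sorted2 (PySem.List.enumerate xs) (fun p => -(key p.2)) (fun p => p.1) false).map (fun p => p.2)
      = PySem.List.sorted xs key true := by
  rw [PySem.List.sorted_rev_eq_foldl_insertBy]
  show (List.foldl (fun acc x => PySem.List.insertBy
      (fun a b => decide (-(key a.2) < -(key b.2)) || (!decide (-(key b.2) < -(key a.2)) && decide (a.1 < b.1))) x acc)
      [] (PySem.List.enumerate xs 0)).map (fun p => p.2) = _
  suffices h : ∀ (l : List α) (s : Int) (accD : List (Int × α)), (∀ q ∈ accD, q.1 < s) →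
      (List.foldl (fun acc x => PySem.List.insertBy
          (fun a b => decide (-(key a.2) < -(key b.2)) || (!decide (-(key b.2) < -(key a.2)) && decide (a.1 < b.1))) x acc)
        accD (PySem.List.enumerate l s)).map (fun p => p.2)
      = List.foldl (fun acc x => PySem.List.insertBy (fun a b => decide (key b < key a)) x acc)
          (accD.map (fun p => p.2)) l by
    simpa using h xs 0 [] (by simp)
  intro l
  induction l with
  | nil => simp [PySem.List.enumerate]
  | cons x t ih =>
      intro s accD hacc
      rw [PySem.List.enumerate_cons]
      simp only [List.foldl_cons]
      have hinv : ∀ q ∈ PySem.List.insertBy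
          (fun a b => decide (-(key a.2) < -(key b.2)) || (!decide (-(key b.2) < -(key a.2)) && decide (a.1 < b.1)))
          (s, x) accD, q.1 < s + 1 := by
        intro q hq
        rw [PySem.List.insertBy_mem_iff] at hq
        rcases hq with h | h
        · simp [h]
        · have := hacc q h; omega
      rw [ih (s+1) _ hinv]
      have hins : (PySem.List.insertBy
          (fun a b => decide (-(key a.2) < -(key b.2)) || (!decide (-(key b.2) < -(key a.2)) && decide (a.1 < b.1)))
          (s, x) accD).map (fun p => p.2)
          = PySem.List.insertBy (fun a b => decide (key b < key a)) x (accD.map (fun p => p.2)) := by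
        clear ih hinv
        induction accD with
        | nil => rfl
        | cons y u ihu =>
            have hy : y.1 < s := hacc y (by simp)
            have hns : ¬ ((s, x).1 < y.1) := by simp; omega
            have hcond : (decide (-(key ((s, x)).2) < -(key y.2))
                || (!decide (-(key y.2) < -(key ((s, x)).2)) && decide ((s, x).1 < y.1)))
                = decide (key y.2 < key x) := by
              simp only [neg_lt_neg_iff]
              by_cases h1 : key y.2 < key x <;> by_cases h2 : key x < key y.2 <;>
                simp [h1, h2, hns]
            simp only [PySem.List.insertBy, hcond]
            by_cases h : key y.2 < key x
            · simp [PySem.List.insertBy, h]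
            · simp only [decide_eq_true_eq, if_neg h, List.map_cons]
              rw [ihu (fun q hq => hacc q (by simp [hq]))]
              simp [PySem.List.insertBy, h]
      rw [hins]

-- sorted2 (reverse=false) as an explicit insertBy fold
theorem sorted2_eq_foldl {α : Type} (l : List α) (k1 k2 : α → Int) :
    PySem.List.sorted2 l k1 k2 false
      = List.foldl (fun acc x => PySem.List.insertBy
          (fun a b => decide (k1 a < k1 b) || (!decide (k1 b < k1 a) && decide (k2 a < k2 b))) x acc) [] l := rfl

-- lexicographic order on Int pairs
def lexLt (u v : Int × Int) : Prop := u.1 < v.1 ∨ (u.1 = v.1 ∧ u.2 < v.2)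

-- the sorted2 comparison, decided by the lexicographic order of the two keys
theorem beforeB_false {α : Type} (k1 k2 : α → Int) (x y : α)
    (h : ¬ (k1 x < k1 y ∨ (k1 x = k1 y ∧ k2 x < k2 y))) :
    (decide (k1 x < k1 y) || (!decide (k1 y < k1 x) && decide (k2 x < k2 y))) = false := by
  by_cases h1 : k1 x < k1 y
  · exact absurd (Or.inl h1) h
  · by_cases h3 : k2 x < k2 y
    · by_cases h2 : k1 y < k1 x
      · simp [h1, h2]
      · exact absurd (Or.inr ⟨by omega, h3⟩) h
    · simp [h1, h3]

theorem beforeB_true {α : Type} (k1 k2 : α → Int) (x y : α)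
    (h : k1 x < k1 y ∨ (k1 x = k1 y ∧ k2 x < k2 y)) :
    (decide (k1 x < k1 y) || (!decide (k1 y < k1 x) && decide (k2 x < k2 y))) = true := by
  rcases h with h | ⟨h1, h2⟩
  · simp [h]
  · have : ¬ k1 y < k1 x := by omega
    simp [h2, this]

-- stable two-key sort = concatenation of key classes, classes in strictly increasing key order
theorem sorted2_eq_flatMap_filter {α : Type} (k1 k2 : α → Int) (e1 : List α) (ks : List (Int × Int))
    (hks : ks.Pairwise lexLt) (hcov : ∀ e ∈ e1, (k1 e, k2 e) ∈ ks) :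
    PySem.List.sorted2 e1 k1 k2 false
      = ks.flatMap (fun k => e1.filter (fun e => decide (k1 e = k.1 ∧ k2 e = k.2))) := by
  induction e1 using List.reverseRecOn with
  | nil => simp [PySem.List.sorted2]
  | append_singleton e1 x ih =>
      have hx : (k1 x, k2 x) ∈ ks := hcov x (by simp)
      have hcov' : ∀ e ∈ e1, (k1 e, k2 e) ∈ ks := fun e he => hcov e (by simp [he])
      rw [sorted2_eq_foldl, List.foldl_append, ← sorted2_eq_foldl, ih hcov']
      simp only [List.foldl_cons, List.foldl_nil]
      clear ih hcov hcov'
      induction ks with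
      | nil => simp at hx
      | cons k ks' ihk =>
          have hpw' : ks'.Pairwise lexLt := hks.tail
          have hklt : ∀ k' ∈ ks', lexLt k k' := fun k' h => (List.pairwise_cons.mp hks).1 k' h
          simp only [List.flatMap_cons]
          by_cases hkx : (k1 x, k2 x) = k
          · -- x belongs to the first class: goes after it, before every later class
            have hk1 : k1 x = k.1 := by rw [← hkx]
            have hk2 : k2 x = k.2 := by rw [← hkx]
            rw [insertBy_append_left _ _ _ _ (by
              intro y hy
              have hyk := List.of_mem_filter hy
              simp only [decide_eq_true_eq] at hyk
              exact beforeB_false k1 k2 x y (by omega))]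
            rw [insertBy_all_before _ _ _ (by
              intro y hy
              rw [List.mem_flatMap] at hy
              obtain ⟨k', hk', hy⟩ := hy
              have hyk := List.of_mem_filter hy
              simp only [decide_eq_true_eq] at hyk
              have hlt : lexLt k k' := hklt k' hk'
              unfold lexLt at hlt
              exact beforeB_true k1 k2 x y (by omega))]
            have hfilx : ∀ k' ∈ ks', ¬ (k1 x = k'.1 ∧ k2 x = k'.2) := by
              intro k' hk'
              have hlt := hklt k' hk'
              unfold lexLt at hlt
              rintro ⟨h1, h2⟩
              omega
            rw [List.filter_append]
            have h1 : [x].filter (fun e => decide (k1 e = k.1 ∧ k2 e = k.2)) = [x] := by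
              simp [hk1, hk2]
            rw [h1]
            have h2 : ks'.flatMap (fun k => (e1 ++ [x]).filter (fun e => decide (k1 e = k.1 ∧ k2 e = k.2)))
                = ks'.flatMap (fun k => e1.filter (fun e => decide (k1 e = k.1 ∧ k2 e = k.2))) := by
              apply List.flatMap_congr
              intro k' hk'
              simp [List.filter_append, hfilx k' hk']
            rw [h2]
            simp
          · -- x belongs to a later class: pass the first class and recurse
            have hx' : (k1 x, k2 x) ∈ ks' := by
              rw [List.mem_cons] at hx
              rcases hx with h | h
              · exact absurd h hkx
              · exact h
            have hklex : lexLt k (k1 x, k2 x) := hklt _ hx'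
            unfold lexLt at hklex
            simp only at hklex
            rw [insertBy_append_left _ _ _ _ (by
              intro y hy
              have hyk := List.of_mem_filter hy
              simp only [decide_eq_true_eq] at hyk
              exact beforeB_false k1 k2 x y (by omega))]
            rw [ihk hpw' hx']
            congr 1
            rw [List.filter_append]
            have hz : [x].filter (fun e => decide (k1 e = k.1 ∧ k2 e = k.2)) = [] := by
              simp only [List.filter_cons, List.filter_nil]
              have : ¬ (k1 x = k.1 ∧ k2 x = k.2) := by
                rintro ⟨h1, h2⟩; exact hkx (Prod.ext_iff.mpr ⟨h1, h2⟩)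
              simp [this]
            simp only [hz, List.append_nil]

-- pairwise order produced by sorted2 (two Int keys, stable)
theorem sorted2_pairwise_lexle {α : Type} (xs : List α) (k1 k2 : α → Int) :
    (PySem.List.sorted2 xs k1 k2 false).Pairwise
      (fun a b => k1 a < k1 b ∨ (k1 a = k1 b ∧ k2 a ≤ k2 b)) := by
  rw [sorted2_eq_foldl]
  suffices h : ∀ (l : List α) (acc : List α),
      acc.Pairwise (fun a b => k1 a < k1 b ∨ (k1 a = k1 b ∧ k2 a ≤ k2 b)) →
      (List.foldl (fun acc x => PySem.List.insertBy
          (fun a b => decide (k1 a < k1 b) || (!decide (k1 b < k1 a) && decide (k2 a < k2 b))) x acc) acc l).Pairwise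
        (fun a b => k1 a < k1 b ∨ (k1 a = k1 b ∧ k2 a ≤ k2 b)) by
    exact h xs [] (by simp)
  intro l
  induction l with
  | nil => intro acc h; simpa using h
  | cons x t ih =>
      intro acc hacc
      simp only [List.foldl_cons]
      apply ih
      -- insertion preserves pairwise order
      clear ih
      induction acc with
      | nil => simp [PySem.List.insertBy]
      | cons y u ihu =>
          by_cases hb : (decide (k1 x < k1 y) || (!decide (k1 y < k1 x) && decide (k2 x < k2 y))) = true
          · simp only [PySem.List.insertBy, hb, if_pos]
            have hxy : k1 x < k1 y ∨ (k1 x = k1 y ∧ k2 x < k2 y) := by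
              simp only [Bool.or_eq_true, Bool.and_eq_true, decide_eq_true_eq, Bool.not_eq_true',
                decide_eq_false_iff_not] at hb
              rcases hb with h | ⟨h1, h2⟩
              · exact Or.inl h
              · by_cases h' : k1 x < k1 y
                · exact Or.inl h'
                · exact Or.inr ⟨by omega, h2⟩
            constructor
            · intro z hz
              rw [List.mem_cons] at hz
              rcases hz with h | h
              · subst h; rcases hxy with h | ⟨h1, h2⟩
                · left; exact h
                · right; exact ⟨h1, le_of_lt h2⟩
              · have hyz := (List.pairwise_cons.mp hacc).1 z h
                rcases hxy with h' | ⟨h1, h2⟩ <;> rcases hyz with h'' | ⟨h3, h4⟩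
                · left; omega
                · left; omega
                · left; omega
                · right; constructor <;> omega
            · exact hacc
          · simp only [PySem.List.insertBy, hb, Bool.false_eq_true, if_false]
            have hyx : k1 y < k1 x ∨ (k1 y = k1 x ∧ k2 y ≤ k2 x) := by
              simp only [Bool.or_eq_true, Bool.and_eq_true, decide_eq_true_eq, Bool.not_eq_true',
                decide_eq_false_iff_not, not_and, not_or] at hb
              rcases hb with ⟨h1, h2⟩
              by_cases h : k1 y < k1 x
              · left; exact h
              · right
                have h2' := h2 h
                constructor <;> omega
            constructor
            · intro z hz
              rw [PySem.List.insertBy_mem_iff] at hz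
              rcases hz with h | h
              · subst h; exact hyx
              · exact (List.pairwise_cons.mp hacc).1 z h
            · exact ihu (List.pairwise_cons.mp hacc).2
  
-- flatMap of an if-singleton selector over a nodup list
theorem flatMap_if_single {α β : Type} [DecidableEq α] (l : List α) (p : α) (g : α → List β)
    (hnd : l.Nodup) (hp : p ∈ l) :
    l.flatMap (fun q => if q = p then g q else []) = g p := by
  induction l with
  | nil => simp at hp
  | cons a t ih =>
      simp only [List.flatMap_cons]
      by_cases h : a = p
      · subst h
        have hnil : t.flatMap (fun q => if q = a then g q else []) = [] := by
          rw [List.flatMap_eq_nil_iff]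
          intro q hq
          have hne : q ≠ a := fun he => (List.nodup_cons.mp hnd).1 (he ▸ hq)
          simp [hne]
        simp [hnil]
      · have hp' : p ∈ t := by
          rw [List.mem_cons] at hp
          rcases hp with h' | h'
          · exact absurd h'.symm h
          · exact h'
        simp [h, ih (List.nodup_cons.mp hnd).2 hp']

-- proof-side abbreviations (used only below)
def pvCompZ (scenes : List (String × List (String × List String))) (num : String) : Int :=
  ((PySem.Dict.getD (PySem.Dict.mk (PySem.Dict.getD (PySem.Dict.mk scenes) num [])) "special_equipment" []).length : Int)
def pvEnt (scenes : List (String × List (String × List String))) (p : Int × String × List String) (num : String) :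
    String × Int × Int × Int :=
  (num, ((p.2.2.length : Int), p.1, pvCompZ scenes num))
def pvGrp (scenes : List (String × List (String × List String))) (p : Int × String × List String) :
    List (String × Int × Int × Int) := p.2.2.map (pvEnt scenes p)
def pvSG (lg : List (String × List String)) : List (Int × String × List String) :=
  PySem.List.sorted2 (PySem.List.enumerate lg) (fun p => -((p.2.2.length : Int))) (fun p => p.1) false

theorem pvSG_perm (lg : List (String × List String)) : (pvSG lg).Perm (PySem.List.enumerate lg) :=
  PySem.List.sorted2_perm _ _ _ _

theorem enum_nodup (lg : List (String × List String)) : (PySem.List.enumerate lg).Nodup :=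
  (enumerate_pairwise_fst_lt lg 0).imp (fun h he => by subst he; exact lt_irrefl _ h)

-- B's value: the groups in the order pvSG, each group's scene numbers stably sorted by complexity
theorem alt_eq (lg : List (String × List String)) (scenes : List (String × List (String × List String))) :
    generate_shooting_order_py_alt lg scenes
      = (pvSG lg).flatMap (fun p => PySem.List.sorted p.2.2 (pvCompZ scenes) false) := by
  show (PySem.List.sorted2
      (PySem.List.sorted ((PySem.List.enumerate lg).flatMap (pvGrp scenes)) (fun e => e.2.2.2) false)
      (fun e => -e.2.1) (fun e => e.2.2.1) false).map (fun e => e.1) = _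
  have hperm := pvSG_perm lg
  have henumpw := enumerate_pairwise_fst_lt lg 0
  have hndfst : ((PySem.List.enumerate lg).map (fun p => p.1)).Nodup := by
    show ((PySem.List.enumerate lg).map (fun p => p.1)).Pairwise (fun a b => a ≠ b)
    exact List.pairwise_map.mpr (henumpw.imp (fun h => by omega))
  have hSGfstnd : ((pvSG lg).map (fun p => p.1)).Nodup := ((hperm.map _).nodup_iff).mpr hndfst
  have hSGne : (pvSG lg).Pairwise (fun p q => p.1 ≠ q.1) := List.pairwise_map.mp hSGfstnd
  have hSGle := sorted2_pairwise_lexle (PySem.List.enumerate lg) (fun p => -((p.2.2.length : Int))) (fun p => p.1)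
  have hks : ((pvSG lg).map (fun p => ((-(p.2.2.length : Int), p.1) : Int × Int))).Pairwise lexLt := by
    rw [List.pairwise_map]
    refine (hSGle.and hSGne).imp ?_
    rintro ⟨hle, hne⟩
    unfold lexLt
    simp only
    omega
  have hcov : ∀ e ∈ PySem.List.sorted ((PySem.List.enumerate lg).flatMap (pvGrp scenes)) (fun e => e.2.2.2) false,
      ((-e.2.1 : Int), e.2.2.1) ∈ (pvSG lg).map (fun p => ((-(p.2.2.length : Int), p.1) : Int × Int)) := by
    intro e he
    have he' : e ∈ (PySem.List.enumerate lg).flatMap (pvGrp scenes) :=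
      (PySem.List.sorted_perm _ _ _).mem_iff.mp he
    rw [List.mem_flatMap] at he'
    obtain ⟨p, hp, hep⟩ := he'
    rw [show pvGrp scenes p = p.2.2.map (pvEnt scenes p) from rfl, List.mem_map] at hep
    obtain ⟨num, _, rfl⟩ := hep
    exact List.mem_map.mpr ⟨p, hperm.mem_iff.mpr hp, rfl⟩
  rw [sorted2_eq_flatMap_filter (α := String × Int × Int × Int) (fun e => -e.2.1) (fun e => e.2.2.1) _ _ hks hcov]
  rw [List.flatMap_map, List.map_flatMap]
  apply List.flatMap_congr
  intro p hp
  have hpe : p ∈ PySem.List.enumerate lg := hperm.mem_iff.mp hp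
  show (((PySem.List.sorted ((PySem.List.enumerate lg).flatMap (pvGrp scenes)) (fun e => e.2.2.2) false).filter
      (fun e => decide (-e.2.1 = ((-(p.2.2.length : Int), p.1) : Int × Int).1 ∧ e.2.2.1 = ((-(p.2.2.length : Int), p.1) : Int × Int).2))).map (fun e => e.1)) = _
  rw [filter_sorted]
  have hfil : ((PySem.List.enumerate lg).flatMap (pvGrp scenes)).filter
      (fun e => decide (-e.2.1 = ((-(p.2.2.length : Int), p.1) : Int × Int).1 ∧ e.2.2.1 = ((-(p.2.2.length : Int), p.1) : Int × Int).2))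
      = pvGrp scenes p := by
    rw [List.filter_flatMap]
    have hpt : ∀ q ∈ PySem.List.enumerate lg,
        (pvGrp scenes q).filter
          (fun e => decide (-e.2.1 = ((-(p.2.2.length : Int), p.1) : Int × Int).1 ∧ e.2.2.1 = ((-(p.2.2.length : Int), p.1) : Int × Int).2))
          = if q = p then pvGrp scenes q else [] := by
      intro q hq
      by_cases hqp : q = p
      · subst hqp
        rw [if_pos rfl, List.filter_eq_self]
        intro e he
        rw [show pvGrp scenes q = q.2.2.map (pvEnt scenes q) from rfl, List.mem_map] at he
        obtain ⟨num, _, rfl⟩ := he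
        simp [pvEnt]
      · rw [if_neg hqp, List.filter_eq_nil_iff]
        intro e he
        rw [show pvGrp scenes q = q.2.2.map (pvEnt scenes q) from rfl, List.mem_map] at he
        obtain ⟨num, _, rfl⟩ := he
        simp only [pvEnt, decide_eq_true_eq, not_and]
        intro _ h2
        exact absurd (enumerate_fst_inj lg 0 hq hpe h2) hqp
    rw [List.flatMap_congr hpt, flatMap_if_single _ p _ (enum_nodup lg) hpe]
  rw [hfil]
  rw [show pvGrp scenes p = p.2.2.map (pvEnt scenes p) from rfl]
  rw [map_sorted (pvEnt scenes p) (fun e => e.2.2.2) p.2.2, List.map_map]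
  show (PySem.List.sorted p.2.2 (pvCompZ scenes) false).map ((fun e => e.1) ∘ pvEnt scenes p)
      = PySem.List.sorted p.2.2 (pvCompZ scenes) false
  rw [show ((fun (e : String × Int × Int × Int) => e.1) ∘ pvEnt scenes p) = id from rfl, List.map_id]

-- A's value: the same decomposition
theorem a_eq (lg : List (String × List String)) (scenes : List (String × List (String × List String))) :
    generate_shooting_order_py lg scenes
      = (pvSG lg).flatMap (fun p => PySem.List.sorted p.2.2 (pvCompZ scenes) false) := by
  show (PySem.List.sorted lg (fun x => (x.2.length : Int)) true).foldl (fun shooting_order x =>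
      shooting_order ++ (PySem.List.sorted (x.2.map (fun num => (num, PySem.Dict.getD (PySem.Dict.mk scenes) num [])))
        (fun y => ((PySem.Dict.getD (PySem.Dict.mk y.2) "special_equipment" []).length : Int)) false).map (fun s => s.1)) []
      = _
  rw [PySem.List.foldl_append_eq_flatMap]
  rw [List.nil_append]
  have hSL : PySem.List.sorted lg (fun x => (x.2.length : Int)) true = (pvSG lg).map (fun p => p.2) :=
    (snd_sorted2_enumerate lg (fun x => (x.2.length : Int))).symm
  rw [hSL, List.flatMap_map]
  apply List.flatMap_congr
  intro p hp
  rw [map_sorted (fun num => (num, PySem.Dict.getD (PySem.Dict.mk scenes) num []))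
    (fun y => ((PySem.Dict.getD (PySem.Dict.mk y.2) "special_equipment" []).length : Int)) p.2.2, List.map_map]
  show (PySem.List.sorted p.2.2 (pvCompZ scenes) false).map
      ((fun (s : String × List (String × List String)) => s.1) ∘ (fun num => (num, PySem.Dict.getD (PySem.Dict.mk scenes) num [])))
      = PySem.List.sorted p.2.2 (pvCompZ scenes) false
  rw [show ((fun (s : String × List (String × List String)) => s.1) ∘ (fun num => (num, PySem.Dict.getD (PySem.Dict.mk scenes) num []))) = id from rfl, List.map_id]

-- ===== VERDICT (by name: the statement is the Claim_ definition above) =====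
theorem generate_shooting_order_py_spec : Claim_equal_generate_shooting_order_py := by
  intro lg scenes _ _
  unfold Spec_generate_shooting_order_py
  exact (a_eq lg scenes).trans (alt_eq lg scenes).symm
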